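-- pv_equiv track=rewrite | github.com/pacifiic/augment-finetune-genomics | alphagenome/7.prediction.py | pick_track
-- ===== SOURCE A (Python) =====
-- def pick_track(columns, gene_strand, candidates):
--     """
--     Select tracks from candidates according to priority.
--     Strand matching is prioritized:
--       gene_strand == "+" → use *_+
--       gene_strand == "-" → use *_-
--       fallback: *_unstranded
--     """
--
--     if gene_strand == "+":
--         for c in candidates:
--             if c.endswith("_+") and c in columns:
--                 return c
--     elif gene_strand == "-":
--         for c in candidates:
--             if c.endswith("_-") and c in columns:
--                 return c
--     # fallback
--     for c in candidates:
--         if "unstranded" in c and c in columns: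
--             return c
--     return None
-- ===== SOURCE B (Python) =====
-- def pick_track(columns, gene_strand, candidates):
--     cols = set(columns)
--     suffix = {"+": "_+", "-": "_-"}.get(gene_strand)
--     fallback = None
--     for c in candidates:
--         if c not in cols:
--             continue
--         if suffix is not None and c.endswith(suffix):
--             return c
--         if fallback is None and "unstranded" in c:
--             fallback = c
--     return fallback
-- ===== Notes on version B (the rewrite author's own statement) =====
-- stated objective: simpler
-- what changed: Replaces A's up-to-two full passes (strand pass then unstranded fallback pass) with a single pass that returns a strand match immediately and records the first unstranded match as a fallback, using a set for column membership.
import Mathlib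
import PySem

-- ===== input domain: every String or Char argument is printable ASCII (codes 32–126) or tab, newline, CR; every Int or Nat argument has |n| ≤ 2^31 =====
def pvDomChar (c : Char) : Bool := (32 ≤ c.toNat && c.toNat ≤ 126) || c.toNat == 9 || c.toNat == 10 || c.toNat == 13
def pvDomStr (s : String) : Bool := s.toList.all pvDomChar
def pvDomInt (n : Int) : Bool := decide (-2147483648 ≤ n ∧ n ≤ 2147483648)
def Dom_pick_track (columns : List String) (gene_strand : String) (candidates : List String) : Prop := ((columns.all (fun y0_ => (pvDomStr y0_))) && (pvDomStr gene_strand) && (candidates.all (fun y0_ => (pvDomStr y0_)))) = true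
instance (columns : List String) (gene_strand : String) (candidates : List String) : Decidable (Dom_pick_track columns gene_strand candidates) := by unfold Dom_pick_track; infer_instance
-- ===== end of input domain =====

-- B does the same selection in ONE pass over candidates (strand match returns at once,
-- first unstranded match is recorded as fallback) instead of A's two sequential passes.

-- ===== PORT A =====
-- first candidate ending with `suf` and present in `columns` (A's strand loop)
def pickEndLoop (columns : List String) (suf : String) : List String → Option String
  | [] => none
  | c :: rest =>
      if PySem.Str.endswith c suf && columns.contains c then some c
      else pickEndLoop columns suf rest

-- first candidate containing "unstranded" and present in `columns` (A's fallback loop)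
def pickUnstrLoop (columns : List String) : List String → Option String
  | [] => none
  | c :: rest =>
      if PySem.Str.isIn "unstranded" c && columns.contains c then some c
      else pickUnstrLoop columns rest

def pick_track (columns : List String) (gene_strand : String) (candidates : List String) : Option String :=
  if gene_strand = "+" then
    match pickEndLoop columns "_+" candidates with
    | some c => some c
    | none => pickUnstrLoop columns candidates
  else if gene_strand = "-" then
    match pickEndLoop columns "_-" candidates with
    | some c => some c
    | none => pickUnstrLoop columns candidates
  else pickUnstrLoop columns candidates

-- ===== PORT B =====
-- single pass: return a strand match immediately, remember the first unstranded fallback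
def altLoop (cols : PySem.Set String) (suffix : Option String) (fallback : Option String) : List String → Option String
  | [] => fallback
  | c :: rest =>
      if ¬ PySem.Set.contains cols c then altLoop cols suffix fallback rest
      else if (match suffix with | some s => PySem.Str.endswith c s | none => false) then some c
      else if fallback = none && PySem.Str.isIn "unstranded" c then altLoop cols suffix (some c) rest
      else altLoop cols suffix fallback rest

def pick_track_alt (columns : List String) (gene_strand : String) (candidates : List String) : Option String :=
  let cols := PySem.Set.ofList columns
  let suffix : Option String :=
    if gene_strand = "+" then some "_+" else if gene_strand = "-" then some "_-" else none
  altLoop cols suffix none candidates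

-- ===== PRECONDITION & SPEC =====
def Spec_pick_track (columns : List String) (gene_strand : String) (candidates : List String) (out : Option String) : Prop := out = pick_track_alt columns gene_strand candidates
instance (columns : List String) (gene_strand : String) (candidates : List String) (out : Option String) : Decidable (Spec_pick_track columns gene_strand candidates out) := by unfold Spec_pick_track; infer_instance

-- ===== CLAIM (what is proved, stated in full; the proofs are below) =====
def Claim_equal_pick_track : Prop := ∀ (columns : List String) (gene_strand : String) (candidates : List String), Dom_pick_track columns gene_strand candidates → Spec_pick_track columns gene_strand candidates (pick_track columns gene_strand candidates)

-- ===== LEMMAS AND PROOFS =====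

theorem set_contains_eq (columns : List String) (c : String) :
    PySem.Set.contains (PySem.Set.ofList columns) c = columns.contains c := by
  simp [PySem.Set.mem_ofList]

theorem altLoop_some (columns : List String) (s : String) (fb : Option String) (cs : List String) :
    altLoop (PySem.Set.ofList columns) (some s) fb cs =
      match pickEndLoop columns s cs with
      | some p => some p
      | none => match fb with
                | some f => some f
                | none => pickUnstrLoop columns cs := by
  induction cs generalizing fb with
  | nil => cases fb <;> simp [altLoop, pickEndLoop, pickUnstrLoop]
  | cons c rest ih =>
      by_cases hc : c ∈ columns
      · by_cases he : PySem.Chars.endswith c.toList s.toList = true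
        · simp [altLoop, pickEndLoop, set_contains_eq, hc, he]
        · by_cases hu : PySem.Chars.isIn ['u', 'n', 's', 't', 'r', 'a', 'n', 'd', 'e', 'd'] c.toList = true
          · cases fb <;>
              simp [altLoop, pickEndLoop, pickUnstrLoop, set_contains_eq, hc, he, hu, ih]
          · cases fb <;>
              simp [altLoop, pickEndLoop, pickUnstrLoop, set_contains_eq, hc, he, hu, ih]
      · simp [altLoop, pickEndLoop, pickUnstrLoop, set_contains_eq, hc, ih]

theorem altLoop_none (columns : List String) (fb : Option String) (cs : List String) :
    altLoop (PySem.Set.ofList columns) none fb cs =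
      match fb with
      | some f => some f
      | none => pickUnstrLoop columns cs := by
  induction cs generalizing fb with
  | nil => cases fb <;> simp [altLoop, pickUnstrLoop]
  | cons c rest ih =>
      by_cases hc : c ∈ columns
      · by_cases hu : PySem.Chars.isIn ['u', 'n', 's', 't', 'r', 'a', 'n', 'd', 'e', 'd'] c.toList = true
        · cases fb <;> simp [altLoop, pickUnstrLoop, set_contains_eq, hc, hu, ih]
        · cases fb <;> simp [altLoop, pickUnstrLoop, set_contains_eq, hc, hu, ih]
      · simp [altLoop, pickUnstrLoop, set_contains_eq, hc, ih]

-- ===== VERDICT (by name: the statement is the Claim_ definition above) =====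
theorem pick_track_spec : Claim_equal_pick_track := by
  intro columns gene_strand candidates _
  unfold Spec_pick_track pick_track pick_track_alt
  by_cases h1 : gene_strand = "+"
  · simp [h1, altLoop_some]
  · by_cases h2 : gene_strand = "-"
    · simp [h2, altLoop_some]
    · simp [h1, h2, altLoop_none]
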